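-- pv_equiv track=rewrite | github.com/Amberalex42/python | seminar3/ex8.py | get_negafibo
-- ===== SOURCE A (Python) =====
-- def get_negafibo(n):
--     n0 = 0
--     n1 = 1
--     result = []
--     for i in range(n):
--         result.append(n1)
--         n0, n1 = n1, n0 - n1
--     return result
-- ===== SOURCE B (Python) =====
-- def get_negafibo(n):
--     # Phase 1: ordinary positive Fibonacci numbers (countdown while loop)
--     fibs = []
--     a, b = 1, 1
--     k = n
--     while k > 0:
--         fibs.append(a)
--         a, b = b, a + b
--         k -= 1
--     # Phase 2: negafibonacci sign pattern: +, -, +, -, ...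
--     return [(-1) ** i * f for i, f in enumerate(fibs)]
-- ===== Notes on version B (the rewrite author's own statement) =====
-- stated objective: alternative
-- what changed: B builds the ordinary positive Fibonacci list first and then applies the alternating sign pattern plus/minus in a separate enumerate-comprehension, instead of A's single subtractive recurrence that updates the pair to (n1, n0 minus n1).
import Mathlib
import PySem

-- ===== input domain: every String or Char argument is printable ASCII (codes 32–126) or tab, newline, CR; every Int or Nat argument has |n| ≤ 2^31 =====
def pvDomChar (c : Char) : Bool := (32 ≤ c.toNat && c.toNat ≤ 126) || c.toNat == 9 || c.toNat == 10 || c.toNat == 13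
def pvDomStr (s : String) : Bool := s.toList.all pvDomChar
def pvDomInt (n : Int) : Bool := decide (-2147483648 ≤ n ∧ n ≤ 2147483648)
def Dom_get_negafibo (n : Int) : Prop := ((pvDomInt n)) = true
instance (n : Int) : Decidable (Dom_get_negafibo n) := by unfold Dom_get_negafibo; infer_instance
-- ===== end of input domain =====

-- B builds the positive Fibonacci list and applies alternating signs in a second pass,
-- instead of A's single subtractive recurrence (objective: alternative decomposition).


-- ===== PORT A =====
-- the for-loop over range(n), carrying (n0, n1, result)
def getNegafiboGo : List Int → Int → Int → List Int → List Int
  | [], _, _, result => result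
  | _ :: rest, n0, n1, result => getNegafiboGo rest n1 (n0 - n1) (result ++ [n1])

def get_negafibo (n : Int) : List Int :=
  getNegafiboGo (PySem.List.pyRange 0 n 1) 0 1 []

-- ===== PORT B =====
-- phase 1 of Source B: the countdown while-loop building the positive Fibonacci list
def fibLoop : Nat → Int → Int → List Int → List Int
  | 0, _, _, fibs => fibs
  | k + 1, a, b, fibs => fibLoop k b (a + b) (fibs ++ [a])

def get_negafibo_alt (n : Int) : List Int :=
  (fibLoop n.toNat 1 1 []).mapIdx (fun i f => (-1) ^ i * f)

-- ===== PRECONDITION & SPEC =====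
def Spec_get_negafibo (n : Int) (out : List Int) : Prop := out = get_negafibo_alt n
instance (n : Int) (out : List Int) : Decidable (Spec_get_negafibo n out) := by unfold Spec_get_negafibo; infer_instance

-- ===== CLAIM (what is proved, stated in full; the proofs are below) =====
def Claim_equal_get_negafibo : Prop := ∀ (n : Int), Dom_get_negafibo n → Spec_get_negafibo n (get_negafibo n)

-- ===== LEMMAS AND PROOFS =====

-- accumulator-free form of A's loop
def aLoop : Nat → Int → Int → List Int
  | 0, _, _ => []
  | k + 1, n0, n1 => n1 :: aLoop k n1 (n0 - n1)

-- accumulator-free form of B's Fibonacci loop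
def fibList : Nat → Int → Int → List Int
  | 0, _, _ => []
  | k + 1, a, b => a :: fibList k b (a + b)

theorem getNegafiboGo_eq (l : List Int) : ∀ (n0 n1 : Int) (res : List Int),
    getNegafiboGo l n0 n1 res = res ++ aLoop l.length n0 n1 := by
  induction l with
  | nil => intro n0 n1 res; simp [getNegafiboGo, aLoop]
  | cons x rest ih =>
      intro n0 n1 res
      simp [getNegafiboGo, aLoop, ih]

theorem fibLoop_eq (k : Nat) : ∀ (a b : Int) (fibs : List Int),
    fibLoop k a b fibs = fibs ++ fibList k a b := by
  induction k with
  | zero => intro a b fibs; simp [fibLoop, fibList]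
  | succ k ih =>
      intro a b fibs
      simp [fibLoop, fibList, ih]

-- invariant linking the subtractive state to the positive one with an alternating sign
theorem aLoop_eq_signed (k : Nat) : ∀ (e x y : Int),
    aLoop k (e * (x - y)) (e * x) = (fibList k x y).mapIdx (fun i f => (-1) ^ i * e * f) := by
  induction k with
  | zero => intro e x y; simp [aLoop, fibList]
  | succ k ih =>
      intro e x y
      have e1 : e * x = (-e) * (y - (x + y)) := by ring
      have e2 : e * (x - y) - e * x = (-e) * y := by ring
      have hfun : (fun (i : Nat) (f : Int) => (-1 : Int) ^ (i + 1) * e * f)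
          = (fun (i : Nat) (f : Int) => (-1 : Int) ^ i * (-e) * f) := by
        funext i f; ring
      simp only [aLoop, fibList, List.mapIdx_cons, pow_zero, one_mul, hfun]
      rw [e2, e1]
      exact congrArg (List.cons _) (ih (-e) y (x + y))

theorem get_negafibo_eq_signed (n : Int) :
    get_negafibo n = (fibList n.toNat 1 1).mapIdx (fun i f => (-1) ^ i * f) := by
  unfold get_negafibo
  rw [getNegafiboGo_eq, PySem.List.length_pyRange_one]
  have h0 : (0 : Int) = 1 * ((1 : Int) - 1) := by ring
  have h1 : (1 : Int) = 1 * (1 : Int) := by ring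
  rw [show (n - 0 : Int) = n by ring]
  calc ([] : List Int) ++ aLoop n.toNat 0 1
      = aLoop n.toNat (1 * ((1:Int) - 1)) (1 * (1:Int)) := by norm_num
    _ = (fibList n.toNat 1 1).mapIdx (fun i f => (-1) ^ i * 1 * f) := aLoop_eq_signed n.toNat 1 1 1
    _ = (fibList n.toNat 1 1).mapIdx (fun i f => (-1) ^ i * f) := by
        have : (fun (i : Nat) (f : Int) => (-1 : Int) ^ i * 1 * f)
            = (fun (i : Nat) (f : Int) => (-1 : Int) ^ i * f) := by funext i f; ring
        rw [this]

-- ===== VERDICT (by name: the statement is the Claim_ definition above) =====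
theorem get_negafibo_spec : Claim_equal_get_negafibo := by
  intro n _
  unfold Spec_get_negafibo get_negafibo_alt
  rw [fibLoop_eq]
  simpa using get_negafibo_eq_signed n
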